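-- pv_equiv track=rewrite | github.com/vikneshsr13/Virtual-keyboard | virtual keyboard .py | get_key_pressed
-- ===== SOURCE A (Python) =====
-- keys = [['Q', 'W', 'E', 'R', 'T', 'Y', 'U', 'I', 'O', 'P'],
--         ['A', 'S', 'D', 'F', 'G', 'H', 'J', 'K', 'L'],
--         ['Z', 'X', 'C', 'V', 'B', 'N', 'M'],
--         ['SPACE', 'BACKSPACE']]
--
-- key_size = 80
--
-- margin = 10
--
-- def get_key_pressed(x, y):
--     y_offset = 50
--     for row in keys:
--         x_offset = 50
--         for key in row:
--             w = key_size * 2 if key == "SPACE" else key_size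
--             if x_offset < x < x_offset + w and y_offset < y < y_offset + key_size:
--                 return key
--             x_offset += w + margin
--         y_offset += key_size + margin
--     return None
-- ===== SOURCE B (Python) =====
-- keys = [['Q', 'W', 'E', 'R', 'T', 'Y', 'U', 'I', 'O', 'P'],
--         ['A', 'S', 'D', 'F', 'G', 'H', 'J', 'K', 'L'],
--         ['Z', 'X', 'C', 'V', 'B', 'N', 'M'],
--         ['SPACE', 'BACKSPACE']]
--
-- key_size = 80
--
-- margin = 10
--
--
-- def get_key_pressed(x, y):
--     # Locate the row arithmetically: rows start at y=50 with stride 90 (80px key + 10px gap).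
--     t = y - 50
--     i = t // 90
--     if not (0 <= i <= 3 and 0 < t - 90 * i < 80):
--         return None
--     if i == 3:
--         # Bottom row: SPACE is double width (160), BACKSPACE starts after it.
--         if 50 < x < 210:
--             return 'SPACE'
--         if 220 < x < 300:
--             return 'BACKSPACE'
--         return None
--     # Uniform rows: keys start at x=50 with stride 90.
--     row = keys[i]
--     u = x - 50
--     j = u // 90
--     if 0 <= j < len(row) and 0 < u - 90 * j < 80:
--         return row[j]
--     return None
-- ===== Notes on version B (the rewrite author's own statement) =====
-- stated objective: alternative
-- what changed: B computes the row and column indices directly with floor division (y-50)//90 and (x-50)//90 plus an in-band remainder check, special-casing only the bottom row, instead of A's nested scan over every key with running offsets.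
import Mathlib
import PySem

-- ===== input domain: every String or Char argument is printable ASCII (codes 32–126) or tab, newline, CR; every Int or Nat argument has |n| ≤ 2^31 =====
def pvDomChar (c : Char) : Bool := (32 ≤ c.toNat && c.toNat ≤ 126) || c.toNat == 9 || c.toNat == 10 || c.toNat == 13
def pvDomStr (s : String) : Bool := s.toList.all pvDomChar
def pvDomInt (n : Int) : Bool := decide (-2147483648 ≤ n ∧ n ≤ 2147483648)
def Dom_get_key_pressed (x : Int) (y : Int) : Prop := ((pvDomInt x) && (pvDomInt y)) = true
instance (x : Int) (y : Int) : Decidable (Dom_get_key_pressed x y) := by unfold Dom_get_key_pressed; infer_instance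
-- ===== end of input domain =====

-- B replaces A's scan over every key with direct row/column floor-division arithmetic; same return value everywhere.

-- ===== PORT A =====
def pvKeys : List (List String) :=
  [["Q", "W", "E", "R", "T", "Y", "U", "I", "O", "P"],
   ["A", "S", "D", "F", "G", "H", "J", "K", "L"],
   ["Z", "X", "C", "V", "B", "N", "M"],
   ["SPACE", "BACKSPACE"]]

def pvRowScan (x y : Int) (yoff : Int) : Int → List String → Option String
  | _, [] => none
  | xoff, k :: rest =>
    let w : Int := if k = "SPACE" then 80 * 2 else 80
    if xoff < x ∧ x < xoff + w ∧ yoff < y ∧ y < yoff + 80 then some k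
    else pvRowScan x y yoff (xoff + w + 10) rest

def pvRowsScan (x y : Int) : Int → List (List String) → Option String
  | _, [] => none
  | yoff, r :: rest =>
    match pvRowScan x y yoff 50 r with
    | some k => some k
    | none => pvRowsScan x y (yoff + 80 + 10) rest

def get_key_pressed (x : Int) (y : Int) : Option String :=
  pvRowsScan x y 50 pvKeys

def get_key_pressed_alt (x : Int) (y : Int) : Option String :=
  let t := y - 50
  let i := PySem.Int.floordiv t 90
  if ¬ (0 ≤ i ∧ i ≤ 3 ∧ 0 < t - 90 * i ∧ t - 90 * i < 80) then none
  else if i = 3 then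
    if 50 < x ∧ x < 210 then some "SPACE"
    else if 220 < x ∧ x < 300 then some "BACKSPACE"
    else none
  else
    match PySem.List.pyGet? pvKeys i with
    | none => none
    | some row =>
      let u := x - 50
      let j := PySem.Int.floordiv u 90
      if 0 ≤ j ∧ j < (row.length : Int) ∧ 0 < u - 90 * j ∧ u - 90 * j < 80 then
        PySem.List.pyGet? row j
      else none

-- ===== PRECONDITION & SPEC =====
def Spec_get_key_pressed (x : Int) (y : Int) (out : Option String) : Prop := out = get_key_pressed_alt x y
instance (x : Int) (y : Int) (out : Option String) : Decidable (Spec_get_key_pressed x y out) := by unfold Spec_get_key_pressed; infer_instance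

-- ===== CLAIM (what is proved, stated in full; the proofs are below) =====
def Claim_equal_get_key_pressed : Prop := ∀ (x : Int) (y : Int), Dom_get_key_pressed x y → Spec_get_key_pressed x y (get_key_pressed x y)

-- ===== LEMMAS AND PROOFS =====
theorem rowScan_closed (x y yoff : Int) (row : List String) (hs : "SPACE" ∉ row) :
    ∀ xoff : Int, pvRowScan x y yoff xoff row =
      if yoff < y ∧ y < yoff + 80 ∧ 0 ≤ (x - xoff) / 90 ∧ (x - xoff) / 90 < (row.length : Int) ∧
         0 < (x - xoff) - 90 * ((x - xoff) / 90) ∧ (x - xoff) - 90 * ((x - xoff) / 90) < 80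
      then row[((x - xoff) / 90).toNat]?
      else none := by
  induction row with
  | nil =>
    intro xoff
    simp [pvRowScan]
  | cons k rest ih =>
    intro xoff
    have hk : ¬ (k = "SPACE") := fun h => hs (h ▸ List.mem_cons_self)
    have hrest : "SPACE" ∉ rest := fun h => hs (List.mem_cons_of_mem _ h)
    simp only [pvRowScan, if_neg hk]
    by_cases hhit : xoff < x ∧ x < xoff + 80 ∧ yoff < y ∧ y < yoff + 80
    · rw [if_pos hhit]
      have h0 : (x - xoff) / 90 = 0 := by omega
      rw [if_pos (by push_cast [List.length_cons]; omega)]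
      simp [h0]
    · rw [if_neg hhit, ih hrest (xoff + 80 + 10)]
      by_cases hC : yoff < y ∧ y < yoff + 80 ∧ 0 ≤ (x - xoff) / 90 ∧
          (x - xoff) / 90 < ((k :: rest).length : Int) ∧
          0 < (x - xoff) - 90 * ((x - xoff) / 90) ∧ (x - xoff) - 90 * ((x - xoff) / 90) < 80
      · rw [if_pos hC]
        have hq1 : 1 ≤ (x - xoff) / 90 := by
          simp only [List.length_cons] at hC; push_cast at hC; omega
        rw [if_pos (by simp only [List.length_cons] at hC ⊢; push_cast at hC ⊢; omega)]
        have hidx : ((x - xoff) / 90).toNat = ((x - (xoff + 80 + 10)) / 90).toNat + 1 := by omega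
        rw [hidx]
        simp
      · rw [if_neg hC]
        rw [if_neg (by simp only [List.length_cons] at hC ⊢; push_cast at hC ⊢; omega)]

def pvRow0 : List String := ["Q", "W", "E", "R", "T", "Y", "U", "I", "O", "P"]
def pvRow1 : List String := ["A", "S", "D", "F", "G", "H", "J", "K", "L"]
def pvRow2 : List String := ["Z", "X", "C", "V", "B", "N", "M"]
def pvRow3 : List String := ["SPACE", "BACKSPACE"]

theorem pvKeys_eq : pvKeys = [pvRow0, pvRow1, pvRow2, pvRow3] := rfl

theorem main_eq (x y : Int) : get_key_pressed x y = get_key_pressed_alt x y := by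
  have h90 : (0:Int) < 90 := by norm_num
  unfold get_key_pressed get_key_pressed_alt
  rw [pvKeys_eq]
  simp only [PySem.Int.floordiv_eq_ediv_of_pos h90, pvRowsScan, Int.reduceAdd]
  rw [rowScan_closed x y 50 pvRow0 (by decide) 50,
      rowScan_closed x y 140 pvRow1 (by decide) 50,
      rowScan_closed x y 230 pvRow2 (by decide) 50]
  simp only [pvRowScan, pvRow3, String.reduceEq, reduceIte, Int.reduceAdd, Int.reduceMul]
  by_cases hy : 0 ≤ (y - 50) / 90 ∧ (y - 50) / 90 ≤ 3 ∧ 0 < y - 50 - 90 * ((y - 50) / 90) ∧ y - 50 - 90 * ((y - 50) / 90) < 80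
  · have hi : (y - 50) / 90 = 0 ∨ (y - 50) / 90 = 1 ∨ (y - 50) / 90 = 2 ∨ (y - 50) / 90 = 3 := by omega
    rcases hi with hi | hi | hi | hi
    · -- i = 0
      rw [if_neg (not_not_intro hy), if_neg (show ¬((y - 50) / 90 = 3) by omega), hi,
          show PySem.List.pyGet? [pvRow0, pvRow1, pvRow2, ["SPACE", "BACKSPACE"]] (0 : Int) = some pvRow0 from rfl]
      try dsimp only
      have hL : pvRow0.length = 10 := rfl
      by_cases hx : 0 ≤ (x - 50) / 90 ∧ (x - 50) / 90 < (pvRow0.length : Int) ∧ 0 < x - 50 - 90 * ((x - 50) / 90) ∧ x - 50 - 90 * ((x - 50) / 90) < 80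
      · rw [            if_pos (⟨by omega, by omega, hx⟩ : 50 < y ∧ y < 130 ∧ 0 ≤ (x - 50) / 90 ∧ (x - 50) / 90 < (pvRow0.length : Int) ∧ 0 < x - 50 - 90 * ((x - 50) / 90) ∧ x - 50 - 90 * ((x - 50) / 90) < 80),
            List.getElem?_eq_getElem (show ((x - 50) / 90).toNat < pvRow0.length by omega),
            if_pos hx, PySem.List.pyGet?_of_nonneg _ hx.1,
            List.getElem?_eq_getElem (show ((x - 50) / 90).toNat < pvRow0.length by omega)]
        try dsimp only
      · rw [if_neg hx,
            if_neg (fun h => hx h.2.2),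
            if_neg (show ¬(140 < y ∧ y < 220 ∧ 0 ≤ (x - 50) / 90 ∧ (x - 50) / 90 < (pvRow1.length : Int) ∧ 0 < x - 50 - 90 * ((x - 50) / 90) ∧ x - 50 - 90 * ((x - 50) / 90) < 80) by omega),
            if_neg (show ¬(230 < y ∧ y < 310 ∧ 0 ≤ (x - 50) / 90 ∧ (x - 50) / 90 < (pvRow2.length : Int) ∧ 0 < x - 50 - 90 * ((x - 50) / 90) ∧ x - 50 - 90 * ((x - 50) / 90) < 80) by omega),
            if_neg (show ¬(50 < x ∧ x < 210 ∧ 320 < y ∧ y < 400) by omega),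
            if_neg (show ¬(220 < x ∧ x < 300 ∧ 320 < y ∧ y < 400) by omega)]
        try dsimp only
    · -- i = 1
      rw [if_neg (not_not_intro hy), if_neg (show ¬((y - 50) / 90 = 3) by omega), hi,
          show PySem.List.pyGet? [pvRow0, pvRow1, pvRow2, ["SPACE", "BACKSPACE"]] (1 : Int) = some pvRow1 from rfl]
      try dsimp only
      have hL : pvRow1.length = 9 := rfl
      by_cases hx : 0 ≤ (x - 50) / 90 ∧ (x - 50) / 90 < (pvRow1.length : Int) ∧ 0 < x - 50 - 90 * ((x - 50) / 90) ∧ x - 50 - 90 * ((x - 50) / 90) < 80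
      · rw [            if_neg (show ¬(50 < y ∧ y < 130 ∧ 0 ≤ (x - 50) / 90 ∧ (x - 50) / 90 < (pvRow0.length : Int) ∧ 0 < x - 50 - 90 * ((x - 50) / 90) ∧ x - 50 - 90 * ((x - 50) / 90) < 80) by omega),
            if_pos (⟨by omega, by omega, hx⟩ : 140 < y ∧ y < 220 ∧ 0 ≤ (x - 50) / 90 ∧ (x - 50) / 90 < (pvRow1.length : Int) ∧ 0 < x - 50 - 90 * ((x - 50) / 90) ∧ x - 50 - 90 * ((x - 50) / 90) < 80),
            List.getElem?_eq_getElem (show ((x - 50) / 90).toNat < pvRow1.length by omega),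
            if_pos hx, PySem.List.pyGet?_of_nonneg _ hx.1,
            List.getElem?_eq_getElem (show ((x - 50) / 90).toNat < pvRow1.length by omega)]
        try dsimp only
      · rw [if_neg hx,
            if_neg (show ¬(50 < y ∧ y < 130 ∧ 0 ≤ (x - 50) / 90 ∧ (x - 50) / 90 < (pvRow0.length : Int) ∧ 0 < x - 50 - 90 * ((x - 50) / 90) ∧ x - 50 - 90 * ((x - 50) / 90) < 80) by omega),
            if_neg (fun h => hx h.2.2),
            if_neg (show ¬(230 < y ∧ y < 310 ∧ 0 ≤ (x - 50) / 90 ∧ (x - 50) / 90 < (pvRow2.length : Int) ∧ 0 < x - 50 - 90 * ((x - 50) / 90) ∧ x - 50 - 90 * ((x - 50) / 90) < 80) by omega),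
            if_neg (show ¬(50 < x ∧ x < 210 ∧ 320 < y ∧ y < 400) by omega),
            if_neg (show ¬(220 < x ∧ x < 300 ∧ 320 < y ∧ y < 400) by omega)]
        try dsimp only
    · -- i = 2
      rw [if_neg (not_not_intro hy), if_neg (show ¬((y - 50) / 90 = 3) by omega), hi,
          show PySem.List.pyGet? [pvRow0, pvRow1, pvRow2, ["SPACE", "BACKSPACE"]] (2 : Int) = some pvRow2 from rfl]
      try dsimp only
      have hL : pvRow2.length = 7 := rfl
      by_cases hx : 0 ≤ (x - 50) / 90 ∧ (x - 50) / 90 < (pvRow2.length : Int) ∧ 0 < x - 50 - 90 * ((x - 50) / 90) ∧ x - 50 - 90 * ((x - 50) / 90) < 80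
      · rw [            if_neg (show ¬(50 < y ∧ y < 130 ∧ 0 ≤ (x - 50) / 90 ∧ (x - 50) / 90 < (pvRow0.length : Int) ∧ 0 < x - 50 - 90 * ((x - 50) / 90) ∧ x - 50 - 90 * ((x - 50) / 90) < 80) by omega),
            if_neg (show ¬(140 < y ∧ y < 220 ∧ 0 ≤ (x - 50) / 90 ∧ (x - 50) / 90 < (pvRow1.length : Int) ∧ 0 < x - 50 - 90 * ((x - 50) / 90) ∧ x - 50 - 90 * ((x - 50) / 90) < 80) by omega),
            if_pos (⟨by omega, by omega, hx⟩ : 230 < y ∧ y < 310 ∧ 0 ≤ (x - 50) / 90 ∧ (x - 50) / 90 < (pvRow2.length : Int) ∧ 0 < x - 50 - 90 * ((x - 50) / 90) ∧ x - 50 - 90 * ((x - 50) / 90) < 80),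
            List.getElem?_eq_getElem (show ((x - 50) / 90).toNat < pvRow2.length by omega),
            if_pos hx, PySem.List.pyGet?_of_nonneg _ hx.1,
            List.getElem?_eq_getElem (show ((x - 50) / 90).toNat < pvRow2.length by omega)]
        try dsimp only
      · rw [if_neg hx,
            if_neg (show ¬(50 < y ∧ y < 130 ∧ 0 ≤ (x - 50) / 90 ∧ (x - 50) / 90 < (pvRow0.length : Int) ∧ 0 < x - 50 - 90 * ((x - 50) / 90) ∧ x - 50 - 90 * ((x - 50) / 90) < 80) by omega),
            if_neg (show ¬(140 < y ∧ y < 220 ∧ 0 ≤ (x - 50) / 90 ∧ (x - 50) / 90 < (pvRow1.length : Int) ∧ 0 < x - 50 - 90 * ((x - 50) / 90) ∧ x - 50 - 90 * ((x - 50) / 90) < 80) by omega),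
            if_neg (fun h => hx h.2.2),
            if_neg (show ¬(50 < x ∧ x < 210 ∧ 320 < y ∧ y < 400) by omega),
            if_neg (show ¬(220 < x ∧ x < 300 ∧ 320 < y ∧ y < 400) by omega)]
        try dsimp only
    · -- i = 3
      have hy1 : 320 < y := by omega
      have hy2 : y < 400 := by omega
      rw [if_neg (not_not_intro hy), if_pos hi,
          if_neg (show ¬(50 < y ∧ y < 130 ∧ 0 ≤ (x - 50) / 90 ∧ (x - 50) / 90 < (pvRow0.length : Int) ∧ 0 < x - 50 - 90 * ((x - 50) / 90) ∧ x - 50 - 90 * ((x - 50) / 90) < 80) by omega),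
          if_neg (show ¬(140 < y ∧ y < 220 ∧ 0 ≤ (x - 50) / 90 ∧ (x - 50) / 90 < (pvRow1.length : Int) ∧ 0 < x - 50 - 90 * ((x - 50) / 90) ∧ x - 50 - 90 * ((x - 50) / 90) < 80) by omega),
          if_neg (show ¬(230 < y ∧ y < 310 ∧ 0 ≤ (x - 50) / 90 ∧ (x - 50) / 90 < (pvRow2.length : Int) ∧ 0 < x - 50 - 90 * ((x - 50) / 90) ∧ x - 50 - 90 * ((x - 50) / 90) < 80) by omega)]
      by_cases ha : 50 < x ∧ x < 210 ∧ 320 < y ∧ y < 400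
      · rw [if_pos ha, if_pos (⟨ha.1, ha.2.1⟩ : 50 < x ∧ x < 210)]
        try dsimp only
      · rw [if_neg ha, if_neg (show ¬(50 < x ∧ x < 210) by omega)]
        by_cases hb : 220 < x ∧ x < 300 ∧ 320 < y ∧ y < 400
        · rw [if_pos hb, if_pos (⟨hb.1, hb.2.1⟩ : 220 < x ∧ x < 300)]
          try dsimp only
        · rw [if_neg hb, if_neg (show ¬(220 < x ∧ x < 300) by omega)]
          try dsimp only
  · rw [if_pos hy,
        if_neg (show ¬(50 < y ∧ y < 130 ∧ 0 ≤ (x - 50) / 90 ∧ (x - 50) / 90 < (pvRow0.length : Int) ∧ 0 < x - 50 - 90 * ((x - 50) / 90) ∧ x - 50 - 90 * ((x - 50) / 90) < 80) by omega),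
        if_neg (show ¬(140 < y ∧ y < 220 ∧ 0 ≤ (x - 50) / 90 ∧ (x - 50) / 90 < (pvRow1.length : Int) ∧ 0 < x - 50 - 90 * ((x - 50) / 90) ∧ x - 50 - 90 * ((x - 50) / 90) < 80) by omega),
        if_neg (show ¬(230 < y ∧ y < 310 ∧ 0 ≤ (x - 50) / 90 ∧ (x - 50) / 90 < (pvRow2.length : Int) ∧ 0 < x - 50 - 90 * ((x - 50) / 90) ∧ x - 50 - 90 * ((x - 50) / 90) < 80) by omega),
        if_neg (show ¬(50 < x ∧ x < 210 ∧ 320 < y ∧ y < 400) by omega),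
        if_neg (show ¬(220 < x ∧ x < 300 ∧ 320 < y ∧ y < 400) by omega)]
    try dsimp only

-- ===== VERDICT (by name: the statement is the Claim_ definition above) =====
theorem get_key_pressed_spec : Claim_equal_get_key_pressed := by
  intro x y _
  unfold Spec_get_key_pressed
  exact main_eq x y
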